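-- pv_equiv track=rewrite | github.com/h3y-retr0/Backtracking-RobotMaze | main.py | helper
-- ===== SOURCE A (Python) =====
-- def helper(maze, sol, pos_row, pos_col):
--     num_row = len(maze)
--     num_col = len(maze[0])
--
--     # BASE CASES
--
--     if pos_row == num_row - 1 and pos_col == num_col - 1:
--         # Alredy Home
--         return sol
--     elif pos_row >= num_row or pos_col >= num_col:
--         # Out of bounds
--         return None
--     if maze[pos_row][pos_col] == 'x':
--         # You have hit an obstacle
--         return None
--
--
--     # RECURSIVE CASES
--
--     # Try right
--
--     sol.append("r")
--     sol_right = helper(maze, sol, pos_row, pos_col + 1)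
--     if sol_right is not None:
--         # You've reached a solution
--         return sol_right
--
--
--     # Backtrack
--     sol.pop()
--
--     # Try down
--     sol.append("d")
--     sol_down = helper(maze, sol, pos_row + 1, pos_col)
--     if sol_down is not None:
--         return sol_down
--
--     #No sol
--     sol.pop()
--     return None
-- ===== SOURCE B (Python) =====
-- def helper(maze, sol, pos_row, pos_col):
--     num_row = len(maze)
--     num_col = len(maze[0])
--
--     if pos_row == num_row - 1 and pos_col == num_col - 1:
--         return sol
--     if pos_row >= num_row or pos_col >= num_col:
--         return None
--
--     # reach[(r, c)]: the exit is reachable from (r, c) by right/down moves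
--     reach = {}
--     for r in range(num_row - 1, pos_row - 1, -1):
--         for c in range(num_col - 1, pos_col - 1, -1):
--             if r == num_row - 1 and c == num_col - 1:
--                 ok = True
--             elif maze[r][c] == 'x':
--                 ok = False
--             else:
--                 ok = reach.get((r, c + 1), False) or reach.get((r + 1, c), False)
--             reach[(r, c)] = ok
--
--     if not reach[(pos_row, pos_col)]:
--         return None
--
--     # rebuild the right-first path greedily
--     path = list(sol)
--     r, c = pos_row, pos_col
--     while (r, c) != (num_row - 1, num_col - 1):
--         if reach.get((r, c + 1), False):
--             path.append('r')
--             c += 1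
--         else:
--             path.append('d')
--             r += 1
--     return path
-- ===== Notes on version B (the rewrite author's own statement) =====
-- stated objective: alternative
-- what changed: Replaces A's right-first backtracking recursion with a bottom-up reachability table over the search rectangle plus a greedy right-preferring path reconstruction (exponential worst case becomes O(n*m), though a timing run's input family shows no measured speed-up).
-- outside the precondition, e.g. on helper([['o', 'o', 'o'], ['o']], [], 0, 0): A returns ['r', 'r', 'd'], B raises IndexError
import Mathlib
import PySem

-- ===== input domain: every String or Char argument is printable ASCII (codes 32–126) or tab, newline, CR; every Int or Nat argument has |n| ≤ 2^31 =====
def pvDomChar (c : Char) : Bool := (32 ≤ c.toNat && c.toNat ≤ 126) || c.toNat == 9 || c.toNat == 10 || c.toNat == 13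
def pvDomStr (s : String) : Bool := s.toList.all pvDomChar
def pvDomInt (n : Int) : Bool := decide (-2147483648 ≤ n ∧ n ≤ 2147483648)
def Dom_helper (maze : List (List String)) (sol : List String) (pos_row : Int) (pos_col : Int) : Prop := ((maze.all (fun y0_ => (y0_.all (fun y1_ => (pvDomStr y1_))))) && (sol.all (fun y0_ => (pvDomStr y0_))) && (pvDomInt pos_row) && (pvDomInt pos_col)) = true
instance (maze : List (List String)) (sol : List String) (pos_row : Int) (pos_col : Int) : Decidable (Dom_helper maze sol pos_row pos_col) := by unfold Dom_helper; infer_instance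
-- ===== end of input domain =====

-- B replaces A's right-first backtracking recursion by a bottom-up reachability table plus greedy
-- right-preferring path reconstruction (objective: alternative). Equivalence is about the
-- RETURN value only: A mutates sol in place (extends it on success), B does not.

-- ===== PORT A =====
-- Literal port of A's backtracking recursion; sol.append/pop are modelled by passing sol ++ [m]
-- to the recursive call and reusing the un-appended sol afterwards (return value is identical).
def helper (maze : List (List String)) (sol : List String) (pos_row : Int) (pos_col : Int) : Option (List String) :=
  match h0 : PySem.List.pyGet? maze 0 with
  | none => none   -- maze[0] raises IndexError (empty maze; excluded by Pre_helper)
  | some row0 =>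
    -- num_row = len(maze), num_col = len(maze[0])  (inlined below)
    if pos_row = PySem.List.len maze - 1 ∧ pos_col = PySem.List.len row0 - 1 then some sol
    else if pos_row ≥ PySem.List.len maze ∨ pos_col ≥ PySem.List.len row0 then none
    else
      match (PySem.List.pyGet? maze pos_row).bind (fun row => PySem.List.pyGet? row pos_col) with
      | none => none   -- maze[pos_row][pos_col] raises IndexError; excluded by Pre_helper
      | some cell =>
        if cell = "x" then none
        else
          match helper maze (sol ++ ["r"]) pos_row (pos_col + 1) with
          | some s => some s
          | none =>
            match helper maze (sol ++ ["d"]) (pos_row + 1) pos_col with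
            | some s => some s
            | none => none
termination_by ((maze.length : Int) - pos_row).toNat + (((maze.headD []).length : Int) - pos_col).toNat
decreasing_by
  all_goals
    cases maze with
    | nil => simp [PySem.List.pyGet?, PySem.List.pyIdx?] at h0
    | cons m0 rest =>
      rw [PySem.List.pyGet?_zero_cons] at h0
      cases h0
      simp only [PySem.List.len, List.headD_cons, not_or, not_le] at *
      omega

-- ===== PORT B =====
-- fuel is only a totality guard for B's while loop; it is large enough to never run out
-- on the loop's actual iterations.
def greedyB (reach : PySem.Dict (Int × Int) Bool) (num_row num_col : Int) (fuel : Nat)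
    (path : List String) (r c : Int) : List String :=
  match fuel with
  | 0 => path
  | fuel + 1 =>
    if r = num_row - 1 ∧ c = num_col - 1 then path
    else if reach.getD (r, c + 1) false then greedyB reach num_row num_col fuel (path ++ ["r"]) r (c + 1)
    else greedyB reach num_row num_col fuel (path ++ ["d"]) (r + 1) c

-- the reachability table of B (reach = {} filled row by row, bottom-up, right-to-left)
def buildReach (maze : List (List String)) (row0 : List String) (pos_row pos_col : Int) :
    PySem.Dict (Int × Int) Bool :=
  (PySem.List.pyRange (PySem.List.len maze - 1) (pos_row - 1) (-1)).foldl (fun d r =>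
    (PySem.List.pyRange (PySem.List.len row0 - 1) (pos_col - 1) (-1)).foldl (fun d c =>
      let ok : Bool :=
        if r = PySem.List.len maze - 1 ∧ c = PySem.List.len row0 - 1 then true
        else
          -- maze[r][c] == 'x'; a missing cell (none) raises IndexError in Python,
          -- excluded by Pre_helper
          ((PySem.List.pyGet? maze r).bind (fun row => PySem.List.pyGet? row c)).elim false
            (fun cell =>
              if cell = "x" then false
              else d.getD (r, c + 1) false || d.getD (r + 1, c) false)
      d.insert (r, c) ok) d)
    PySem.Dict.empty

def helper_alt (maze : List (List String)) (sol : List String) (pos_row : Int) (pos_col : Int) : Option (List String) :=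
  match PySem.List.pyGet? maze 0 with
  | none => none   -- maze[0] raises IndexError (empty maze; excluded by Pre_helper)
  | some row0 =>
    -- num_row = len(maze), num_col = len(maze[0])  (inlined below)
    if pos_row = PySem.List.len maze - 1 ∧ pos_col = PySem.List.len row0 - 1 then some sol
    else if pos_row ≥ PySem.List.len maze ∨ pos_col ≥ PySem.List.len row0 then none
    else
      let reach : PySem.Dict (Int × Int) Bool := buildReach maze row0 pos_row pos_col
      match reach.get? (pos_row, pos_col) with
      | none => none   -- reach[(pos_row, pos_col)] KeyError; cannot happen in this branch
      | some ok =>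
        if !ok then none
        else some (greedyB reach (PySem.List.len maze) (PySem.List.len row0)
          ((PySem.List.len maze - pos_row).toNat + (PySem.List.len row0 - pos_col).toNat) sol pos_row pos_col)

-- ===== PRECONDITION & SPEC =====
-- Pre_helper excludes exactly the inputs whose search rectangle contains a missing maze cell:
-- the empty maze (A raises IndexError at maze[0]) and starts whose rectangle reaches outside a
-- short ragged row or beyond the negative-wrap range — B's table fill raises IndexError there,
-- while A either raises as well or returns only because its pruned search avoids the missing cell.
def Pre_helper (maze : List (List String)) (sol : List String) (pos_row : Int) (pos_col : Int) : Prop :=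
  maze ≠ [] ∧
  ((pos_row = (maze.length : Int) - 1 ∧ pos_col = ((maze.headD []).length : Int) - 1) ∨
   pos_row ≥ (maze.length : Int) ∨ pos_col ≥ ((maze.headD []).length : Int) ∨
   (-(maze.length : Int) ≤ pos_row ∧ -((maze.headD []).length : Int) ≤ pos_col ∧
    ∀ a ∈ PySem.List.pyRange pos_row (maze.length : Int) 1,
    ∀ b ∈ PySem.List.pyRange pos_col ((maze.headD []).length : Int) 1,
      ((PySem.List.pyGet? maze a).bind (fun row => PySem.List.pyGet? row b)).isSome = true))
instance (maze : List (List String)) (sol : List String) (pos_row : Int) (pos_col : Int) : Decidable (Pre_helper maze sol pos_row pos_col) := by unfold Pre_helper; infer_instance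

def pvWitness_helper : List (List String) × List String × Int × Int :=
  ([["o", "o"], ["x", "o"]], [], 0, 0)

def Spec_helper (maze : List (List String)) (sol : List String) (pos_row : Int) (pos_col : Int) (out : Option (List String)) : Prop := out = helper_alt maze sol pos_row pos_col
instance (maze : List (List String)) (sol : List String) (pos_row : Int) (pos_col : Int) (out : Option (List String)) : Decidable (Spec_helper maze sol pos_row pos_col out) := by unfold Spec_helper; infer_instance

-- ===== CLAIM (what is proved, stated in full; the proofs are below) =====
def Claim_equal_helper : Prop := ∀ (maze : List (List String)) (sol : List String) (pos_row : Int) (pos_col : Int), Dom_helper maze sol pos_row pos_col → Pre_helper maze sol pos_row pos_col → Spec_helper maze sol pos_row pos_col (helper maze sol pos_row pos_col)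

-- ===== LEMMAS AND PROOFS =====

-- specification recursion: "the exit is reachable from (r, c)", mirroring A's case order
def reachF (maze : List (List String)) (r c : Int) : Bool :=
  if r = (maze.length : Int) - 1 ∧ c = ((maze.headD []).length : Int) - 1 then true
  else if r ≥ (maze.length : Int) ∨ c ≥ ((maze.headD []).length : Int) then false
  else
    match (PySem.List.pyGet? maze r).bind (fun row => PySem.List.pyGet? row c) with
    | none => false
    | some cell =>
      if cell = "x" then false
      else reachF maze r (c + 1) || reachF maze (r + 1) c
termination_by ((maze.length : Int) - r).toNat + (((maze.headD []).length : Int) - c).toNat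
decreasing_by all_goals (simp only [not_or, not_le] at *; omega)

lemma reachF_lt {maze : List (List String)} {r c : Int} (h : reachF maze r c = true) :
    r < (maze.length : Int) ∧ c < ((maze.headD []).length : Int) := by
  rw [reachF] at h
  split_ifs at h with h1 h2
  · omega
  · push_neg at h2; omega

-- the path A's right-first search returns from a reachable cell
def pathF (maze : List (List String)) (r c : Int) : List String :=
  if h : reachF maze r c = true ∧ ¬(r = (maze.length : Int) - 1 ∧ c = ((maze.headD []).length : Int) - 1) then
    if hr : reachF maze r (c + 1) = true then "r" :: pathF maze r (c + 1)
    else "d" :: pathF maze (r + 1) c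
  else []
termination_by ((maze.length : Int) - r).toNat + (((maze.headD []).length : Int) - c).toNat
decreasing_by
  · have := reachF_lt hr; have := reachF_lt h.1; omega
  · have := reachF_lt h.1; omega

-- the dictionary invariant of B's two nested fill loops: after processing rows above rlo fully and
-- row rlo from column clo on, each processed key holds reachF and nothing else is present
def DSpec (m0 : List String) (rest : List (List String)) (pos_col rlo clo : Int)
    (d : PySem.Dict (Int × Int) Bool) : Prop :=
  ∀ a b : Int, d.get? (a, b) =
    if (rlo < a ∨ (a = rlo ∧ clo ≤ b)) ∧ a ≤ ((m0 :: rest).length : Int) - 1 ∧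
        pos_col ≤ b ∧ b ≤ (m0.length : Int) - 1
    then some (reachF (m0 :: rest) a b) else none

lemma dspec_shift {m0 : List String} {rest : List (List String)} {pos_col r : Int}
    {d : PySem.Dict (Int × Int) Bool} (h : DSpec m0 rest pos_col (r + 1) pos_col d) :
    DSpec m0 rest pos_col r ((m0.length : Int) - 1 + 1) d := by
  intro a b
  rw [h a b]
  split_ifs <;> first | rfl | (exfalso; omega)

lemma foldcols (m0 : List String) (rest : List (List String)) (pos_col rr : Int)
    (hr : rr ≤ ((m0 :: rest).length : Int) - 1) :
    ∀ (n : Nat) (c : Int) (d : PySem.Dict (Int × Int) Bool),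
      (c - (pos_col - 1)).toNat = n →
      pos_col - 1 ≤ c → c ≤ (m0.length : Int) - 1 →
      DSpec m0 rest pos_col rr (c + 1) d →
      DSpec m0 rest pos_col rr pos_col
        ((PySem.List.pyRange c (pos_col - 1) (-1)).foldl (fun d c =>
          d.insert (rr, c)
            (if rr = ((m0 :: rest).length : Int) - 1 ∧ c = (m0.length : Int) - 1 then true
             else
               ((PySem.List.pyGet? (m0 :: rest) rr).bind (fun row => PySem.List.pyGet? row c)).elim false
                 (fun cell =>
                   if cell = "x" then false
                   else d.getD (rr, c + 1) false || d.getD (rr + 1, c) false))) d) := by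
  intro n
  induction n with
  | zero =>
    intro c d hn hlo hhi hd
    rw [PySem.List.pyRange_neg_one_eq_nil (by omega)]
    have hc : c + 1 = pos_col := by omega
    rw [hc] at hd
    exact hd
  | succ n ih =>
    intro c d hn hlo hhi hd
    have hcc : pos_col - 1 < c := by omega
    rw [PySem.List.pyRange_neg_one_cons hcc, List.foldl_cons]
    apply ih (c - 1) _ (by omega) (by omega) (by omega)
    -- the inserted value is reachF (m0 :: rest) rr c
    have hok :
        (if rr = ((m0 :: rest).length : Int) - 1 ∧ c = (m0.length : Int) - 1 then true
         else
           ((PySem.List.pyGet? (m0 :: rest) rr).bind (fun row => PySem.List.pyGet? row c)).elim false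
             (fun cell =>
               if cell = "x" then false
               else d.getD (rr, c + 1) false || d.getD (rr + 1, c) false)) =
        reachF (m0 :: rest) rr c := by
      have hget1 : d.getD (rr, c + 1) false = reachF (m0 :: rest) rr (c + 1) := by
        rw [PySem.Dict.getD_eq_get?_getD, hd rr (c + 1)]
        by_cases h1 : c + 1 ≤ (m0.length : Int) - 1
        · rw [if_pos (by refine ⟨Or.inr ⟨rfl, le_refl _⟩, hr, by omega, h1⟩)]
          rfl
        · rw [if_neg (by intro h; exact h1 h.2.2.2)]
          rw [reachF]
          rw [if_neg (by simp only [List.headD_cons]; intro h; omega),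
            if_pos (by simp only [List.headD_cons]; right; omega)]
          rfl
      have hget2 : d.getD (rr + 1, c) false = reachF (m0 :: rest) (rr + 1) c := by
        rw [PySem.Dict.getD_eq_get?_getD, hd (rr + 1) c]
        by_cases h1 : rr + 1 ≤ ((m0 :: rest).length : Int) - 1
        · rw [if_pos (by refine ⟨Or.inl (by omega), h1, by omega, hhi⟩)]
          rfl
        · rw [if_neg (by intro h; exact h1 h.2.1)]
          rw [reachF]
          rw [if_neg (by simp only [List.headD_cons]; intro h; omega),
            if_pos (by simp only [List.headD_cons]; left; omega)]
          rfl
      conv_rhs => rw [reachF]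
      simp only [List.headD_cons]
      by_cases htg : rr = ((m0 :: rest).length : Int) - 1 ∧ c = (m0.length : Int) - 1
      · rw [if_pos htg, if_pos htg]
      · rw [if_neg htg, if_neg htg, if_neg (by intro h; omega)]
        cases hcell : (PySem.List.pyGet? (m0 :: rest) rr).bind (fun row => PySem.List.pyGet? row c) with
        | none => rfl
        | some cell =>
          by_cases hx : cell = "x"
          · simp [hx]
          · simp only [Option.elim_some, if_neg hx]
            rw [hget1, hget2]
    -- the new dictionary satisfies the invariant extended to column c
    intro a b
    rw [PySem.Dict.get?_insert, hok]
    by_cases hab : (a, b) = (rr, c)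
    · have ha : a = rr := congrArg Prod.fst hab
      have hb : b = c := congrArg Prod.snd hab
      rw [if_pos hab, ha, hb,
        if_pos (by refine ⟨Or.inr ⟨rfl, by omega⟩, hr, by omega, hhi⟩)]
    · rw [if_neg hab, hd a b]
      have hne : a ≠ rr ∨ b ≠ c := by
        by_contra hcon
        push_neg at hcon
        exact hab (by rw [hcon.1, hcon.2])
      split_ifs <;> first | rfl | (exfalso; omega)

lemma foldrows (m0 : List String) (rest : List (List String)) (pos_row pos_col : Int)
    (hc : pos_col - 1 ≤ (m0.length : Int) - 1) :
    ∀ (n : Nat) (r : Int) (d : PySem.Dict (Int × Int) Bool),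
      (r - (pos_row - 1)).toNat = n →
      pos_row - 1 ≤ r → r ≤ ((m0 :: rest).length : Int) - 1 →
      DSpec m0 rest pos_col (r + 1) pos_col d →
      DSpec m0 rest pos_col pos_row pos_col
        ((PySem.List.pyRange r (pos_row - 1) (-1)).foldl (fun d r =>
          (PySem.List.pyRange ((m0.length : Int) - 1) (pos_col - 1) (-1)).foldl (fun d c =>
            d.insert (r, c)
              (if r = ((m0 :: rest).length : Int) - 1 ∧ c = (m0.length : Int) - 1 then true
               else
                 ((PySem.List.pyGet? (m0 :: rest) r).bind (fun row => PySem.List.pyGet? row c)).elim false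
                   (fun cell =>
                     if cell = "x" then false
                     else d.getD (r, c + 1) false || d.getD (r + 1, c) false))) d) d) := by
  intro n
  induction n with
  | zero =>
    intro r d hn hlo hhi hd
    rw [show PySem.List.pyRange r (pos_row - 1) (-1) = [] from
      PySem.List.pyRange_neg_one_eq_nil (by omega)]
    have hr : r + 1 = pos_row := by omega
    rw [hr] at hd
    exact hd
  | succ n ih =>
    intro r d hn hlo hhi hd
    have hrr : pos_row - 1 < r := by omega
    rw [PySem.List.pyRange_neg_one_cons hrr, List.foldl_cons]
    apply ih (r - 1) _ (by omega) (by omega) (by omega)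
    have hrow := foldcols m0 rest pos_col r hhi ((m0.length : Int) - 1 - (pos_col - 1)).toNat
      ((m0.length : Int) - 1) d rfl hc (le_refl _) (dspec_shift hd)
    have hr1 : r - 1 + 1 = r := by omega
    rw [hr1]
    exact hrow

-- B's reconstruction loop follows pathF step for step
lemma greedy_eq (m0 : List String) (rest : List (List String)) (pos_row pos_col : Int)
    (d : PySem.Dict (Int × Int) Bool) (hd : DSpec m0 rest pos_col pos_row pos_col d) :
    ∀ (fuel : Nat) (path : List String) (r c : Int),
      pos_row ≤ r → pos_col ≤ c → reachF (m0 :: rest) r c = true →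
      (((m0 :: rest).length : Int) - r).toNat + ((m0.length : Int) - c).toNat ≤ fuel →
      greedyB d ((m0 :: rest).length : Int) (m0.length : Int) fuel path r c =
        path ++ pathF (m0 :: rest) r c := by
  intro fuel
  induction fuel with
  | zero =>
    intro path r c hr hc hreach hfuel
    have := reachF_lt hreach
    simp only [List.headD_cons] at this
    omega
  | succ fuel ih =>
    intro path r c hr hc hreach hfuel
    have hlt := reachF_lt hreach
    simp only [List.headD_cons] at hlt
    rw [greedyB]
    by_cases htg : r = ((m0 :: rest).length : Int) - 1 ∧ c = (m0.length : Int) - 1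
    · rw [if_pos htg, pathF, dif_neg (by intro h; exact h.2 (by simpa using htg))]
      simp
    · rw [if_neg htg]
      have hright : d.getD (r, c + 1) false = reachF (m0 :: rest) r (c + 1) := by
        rw [PySem.Dict.getD_eq_get?_getD, hd r (c + 1)]
        by_cases h1 : c + 1 ≤ (m0.length : Int) - 1
        · rw [if_pos (by refine ⟨by omega, by omega, by omega, h1⟩)]
          rfl
        · rw [if_neg (by intro h; exact h1 h.2.2.2)]
          rw [reachF]
          rw [if_neg (by simp only [List.headD_cons]; intro h; omega),
            if_pos (by simp only [List.headD_cons]; right; omega)]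
          rfl
      rw [hright]
      rw [pathF, dif_pos (by exact ⟨hreach, by simpa using htg⟩)]
      by_cases hrt : reachF (m0 :: rest) r (c + 1) = true
      · rw [if_pos hrt, dif_pos hrt]
        rw [ih (path ++ ["r"]) r (c + 1) hr (by omega) hrt (by omega)]
        simp
      · rw [if_neg hrt, dif_neg hrt]
        have hdown : reachF (m0 :: rest) (r + 1) c = true := by
          rw [reachF] at hreach
          rw [if_neg (by simpa using htg)] at hreach
          rw [if_neg (by simp only [List.headD_cons]; intro h; omega)] at hreach
          cases hcell : (PySem.List.pyGet? (m0 :: rest) r).bind (fun row => PySem.List.pyGet? row c) with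
          | none => rw [hcell] at hreach; simp at hreach
          | some cell =>
            rw [hcell] at hreach
            by_cases hx : cell = "x"
            · simp [hx] at hreach
            · have hreach' : (reachF (m0 :: rest) r (c + 1) || reachF (m0 :: rest) (r + 1) c) = true := by
                simpa [hx] using hreach
              rcases Bool.or_eq_true_iff.mp hreach' with h | h
              · exact absurd h hrt
              · exact h
        rw [ih (path ++ ["d"]) (r + 1) c (by omega) hc hdown (by omega)]
        simp

-- one-step unfolding of helper on a nonempty maze (the maze[0] lookup resolved)
lemma helper_unfold (m0 : List String) (rest : List (List String)) (sol : List String) (r c : Int) :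
    helper (m0 :: rest) sol r c =
      (if r = ((m0 :: rest).length : Int) - 1 ∧ c = (m0.length : Int) - 1 then some sol
       else if r ≥ ((m0 :: rest).length : Int) ∨ c ≥ (m0.length : Int) then none
       else
         match (PySem.List.pyGet? (m0 :: rest) r).bind (fun row => PySem.List.pyGet? row c) with
         | none => none
         | some cell =>
           if cell = "x" then none
           else
             match helper (m0 :: rest) (sol ++ ["r"]) r (c + 1) with
             | some s => some s
             | none =>
               match helper (m0 :: rest) (sol ++ ["d"]) (r + 1) c with
               | some s => some s
               | none => none) := by
  rw [helper]
  split
  · next h0 => rw [PySem.List.pyGet?_zero_cons] at h0; simp at h0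
  · next row0 h0 =>
    rw [PySem.List.pyGet?_zero_cons] at h0
    cases h0
    rfl

-- A's backtracking search computes reachF / pathF
lemma helper_eq_reach (m0 : List String) (rest : List (List String)) :
    ∀ (n : Nat) (r c : Int) (sol : List String),
      (((m0 :: rest).length : Int) - r).toNat + ((m0.length : Int) - c).toNat ≤ n →
      helper (m0 :: rest) sol r c =
        if reachF (m0 :: rest) r c = true then some (sol ++ pathF (m0 :: rest) r c) else none := by
  intro n
  induction n with
  | zero =>
    intro r c sol hn
    have hrf : reachF (m0 :: rest) r c = false := by
      rw [reachF]
      simp only [List.headD_cons]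
      rw [if_neg (by intro h; omega), if_pos (by omega)]
    rw [helper_unfold, if_neg (by intro h; omega), if_pos (by omega), hrf]
    simp
  | succ n ih =>
    intro r c sol hn
    by_cases htg : r = ((m0 :: rest).length : Int) - 1 ∧ c = (m0.length : Int) - 1
    · have hrf : reachF (m0 :: rest) r c = true := by
        rw [reachF]
        simp only [List.headD_cons]
        rw [if_pos htg]
      have hpf : pathF (m0 :: rest) r c = [] := by
        rw [pathF, dif_neg (by intro h; exact h.2 (by simpa using htg))]
      rw [helper_unfold, if_pos htg, hrf, hpf]
      simp
    · by_cases hb : r ≥ ((m0 :: rest).length : Int) ∨ c ≥ (m0.length : Int)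
      · have hrf : reachF (m0 :: rest) r c = false := by
          rw [reachF]
          simp only [List.headD_cons]
          rw [if_neg htg, if_pos hb]
        rw [helper_unfold, if_neg htg, if_pos hb, hrf]
        simp
      · push_neg at hb
        have hb' : ¬(r ≥ ((m0 :: rest).length : Int) ∨ c ≥ (m0.length : Int)) := by omega
        rw [helper_unfold, if_neg htg, if_neg hb']
        cases hcell : (PySem.List.pyGet? (m0 :: rest) r).bind (fun row => PySem.List.pyGet? row c) with
        | none =>
          have hrf : reachF (m0 :: rest) r c = false := by
            rw [reachF]
            simp only [List.headD_cons]
            rw [if_neg htg, if_neg hb', hcell]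
          rw [hrf]
          simp
        | some cell =>
          by_cases hx : cell = "x"
          · have hrf : reachF (m0 :: rest) r c = false := by
              rw [reachF]
              simp only [List.headD_cons]
              rw [if_neg htg, if_neg hb', hcell]
              simp [hx]
            rw [hrf]
            simp [hx]
          · have hrf : reachF (m0 :: rest) r c =
                (reachF (m0 :: rest) r (c + 1) || reachF (m0 :: rest) (r + 1) c) := by
              rw [reachF]
              simp only [List.headD_cons]
              rw [if_neg htg, if_neg hb', hcell]
              simp [hx]
            rw [ih r (c + 1) (sol ++ ["r"]) (by omega), ih (r + 1) c (sol ++ ["d"]) (by omega), hrf]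
            by_cases hrt : reachF (m0 :: rest) r (c + 1) = true
            · have hpf : pathF (m0 :: rest) r c = "r" :: pathF (m0 :: rest) r (c + 1) := by
                rw [pathF, dif_pos ⟨by rw [hrf, hrt]; simp, by simpa using htg⟩, dif_pos hrt]
              simp [hx, hrt, hpf]
            · rw [Bool.not_eq_true] at hrt
              by_cases hdn : reachF (m0 :: rest) (r + 1) c = true
              · have hpf : pathF (m0 :: rest) r c = "d" :: pathF (m0 :: rest) (r + 1) c := by
                  rw [pathF, dif_pos ⟨by rw [hrf, hrt, hdn]; simp, by simpa using htg⟩,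
                    dif_neg (by simp [hrt])]
                simp [hx, hrt, hdn, hpf]
              · rw [Bool.not_eq_true] at hdn
                simp [hx, hrt, hdn]

-- ===== VERDICT =====
theorem helper_spec : Claim_equal_helper := by
  unfold Claim_equal_helper
  intro maze sol pos_row pos_col hdom hpre
  unfold Spec_helper
  obtain ⟨hne, hdisj⟩ := hpre
  cases maze with
  | nil => exact absurd rfl hne
  | cons m0 rest =>
    rw [helper_alt]
    split
    · next h0 => rw [PySem.List.pyGet?_zero_cons] at h0; simp at h0
    · next row0 h0 =>
      rw [PySem.List.pyGet?_zero_cons] at h0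
      injection h0 with h0
      subst h0
      simp only [PySem.List.len]
      have hA := helper_eq_reach m0 rest
        ((((m0 :: rest).length : Int) - pos_row).toNat + ((m0.length : Int) - pos_col).toNat)
        pos_row pos_col sol (le_refl _)
      rw [hA]
      by_cases htg : pos_row = ((m0 :: rest).length : Int) - 1 ∧ pos_col = (m0.length : Int) - 1
      · have hrf : reachF (m0 :: rest) pos_row pos_col = true := by
          rw [reachF]
          simp only [List.headD_cons]
          rw [if_pos htg]
        have hpf : pathF (m0 :: rest) pos_row pos_col = [] := by
          rw [pathF, dif_neg (by intro h; exact h.2 (by simpa using htg))]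
        rw [if_pos htg, hrf, hpf]
        simp
      · by_cases hb : pos_row ≥ ((m0 :: rest).length : Int) ∨ pos_col ≥ (m0.length : Int)
        · have hrf : reachF (m0 :: rest) pos_row pos_col = false := by
            rw [reachF]
            simp only [List.headD_cons]
            rw [if_neg htg, if_pos hb]
          rw [if_neg htg, if_pos hb, hrf]
          simp
        · push_neg at hb
          have hb' : ¬(pos_row ≥ ((m0 :: rest).length : Int) ∨ pos_col ≥ (m0.length : Int)) := by
            omega
          rw [if_neg htg, if_neg hb']
          have hempty : DSpec m0 rest pos_col ((((m0 :: rest).length : Int) - 1) + 1) pos_col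
              PySem.Dict.empty := by
            intro a b
            rw [PySem.Dict.get?_empty, if_neg (by intro h; omega)]
          have hspec := foldrows m0 rest pos_row pos_col (by omega)
            ((((m0 :: rest).length : Int) - 1) - (pos_row - 1)).toNat
            (((m0 :: rest).length : Int) - 1) PySem.Dict.empty rfl (by omega) (by omega) hempty
          have hbuild : DSpec m0 rest pos_col pos_row pos_col
              (buildReach (m0 :: rest) m0 pos_row pos_col) := hspec
          rw [hbuild pos_row pos_col]
          have hcond : ((pos_row < pos_row ∨ (pos_row = pos_row ∧ pos_col ≤ pos_col)) ∧
              pos_row ≤ ((m0 :: rest).length : Int) - 1 ∧ pos_col ≤ pos_col ∧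
              pos_col ≤ (m0.length : Int) - 1) :=
            ⟨Or.inr ⟨rfl, le_refl _⟩, by omega, le_refl _, by omega⟩
          rw [if_pos hcond]
          by_cases hreach : reachF (m0 :: rest) pos_row pos_col = true
          · rw [hreach]
            rw [greedy_eq m0 rest pos_row pos_col _ hbuild _ sol pos_row pos_col (le_refl _)
              (le_refl _) hreach (le_refl _)]
            simp
          · rw [Bool.not_eq_true] at hreach
            rw [hreach]
            simp
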